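-- pv_equiv track=rewrite | github.com/dorittttt/ege2026 | homework variantik 25093318/23 21420.py | f
-- ===== SOURCE A (Python) =====
-- def f(start, stop):
--     if start == stop:
--         return 1
--     if start > stop or start == 35:
--         return 0
--     moves = [
--         f(start + 1, stop),
--         f(start + 2 , stop),
--         f(start * 2, stop)
--     ]
--     return sum(moves)
-- ===== SOURCE B (Python) =====
-- def f(start, stop):
--     if start == stop:
--         return 1
--     if start > stop or start == 35:
--         return 0
--     dp = {stop: 1}
--     for s in range(stop - 1, start - 1, -1):
--         dp[s] = 0 if s == 35 else dp.get(s + 1, 0) + dp.get(s + 2, 0) + dp.get(s * 2, 0)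
--     return dp[start]
-- ===== Notes on version B (the rewrite author's own statement) =====
-- stated objective: alternative
-- what changed: replaces the three-way branching recursion by a single bottom-up dynamic-programming pass that fills a dict of path counts from stop down to start
-- outside the precondition, e.g. on f(0, 5): A raises RecursionError, B returns 14; on f(-1, 3): A raises RecursionError, B returns 7
import Mathlib
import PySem

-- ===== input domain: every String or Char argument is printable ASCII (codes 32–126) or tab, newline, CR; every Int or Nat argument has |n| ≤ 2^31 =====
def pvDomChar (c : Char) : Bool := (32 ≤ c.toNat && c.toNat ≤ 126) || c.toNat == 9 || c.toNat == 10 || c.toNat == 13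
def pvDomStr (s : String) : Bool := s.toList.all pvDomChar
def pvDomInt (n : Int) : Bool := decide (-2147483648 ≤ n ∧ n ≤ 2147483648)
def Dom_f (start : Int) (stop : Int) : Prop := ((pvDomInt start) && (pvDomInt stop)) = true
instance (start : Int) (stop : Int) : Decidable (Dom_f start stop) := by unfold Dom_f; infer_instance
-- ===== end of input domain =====

-- B replaces A's three-way branching recursion by a single bottom-up DP pass over a dict (alternative algorithm).


-- ===== PORT A =====
-- literal port of A's recursion; fuel (stop-start)+1 bounds the recursion depth, which
-- suffices on Pre_f (each move strictly shrinks stop-start there); fuel is never exhausted on Pre_f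
def fAux : Nat → Int → Int → Int
  | 0, _, _ => 0
  | fuel+1, start, stop =>
    if start = stop then 1
    else if start > stop ∨ start = 35 then 0
    else
      let moves := [fAux fuel (start + 1) stop, fAux fuel (start + 2) stop, fAux fuel (start * 2) stop]
      moves.sum

def f (start : Int) (stop : Int) : Int := fAux ((stop - start).toNat + 1) start stop

-- ===== PORT B =====
-- the body of Source B's for-loop
def fStep (d : PySem.Dict Int Int) (s : Int) : PySem.Dict Int Int :=
  d.insert s (if s = 35 then 0 else d.getD (s + 1) 0 + d.getD (s + 2) 0 + d.getD (s * 2) 0)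

def f_alt (start : Int) (stop : Int) : Int :=
  if start = stop then 1
  else if start > stop ∨ start = 35 then 0
  else
    -- dp[start]: the key 'start' is always present here (the loop reaches start), so getD is exact
    (((PySem.List.pyRange (stop - 1) (start - 1) (-1)).foldl fStep
      ((PySem.Dict.empty).insert stop 1))).getD start 0

-- ===== PRECONDITION & SPEC =====
-- Pre_f excludes start ≤ 0 < stop, where A recurses forever through the start*2 self-loop/cycle
-- and raises RecursionError (returns nothing).
def Pre_f (start : Int) (stop : Int) : Prop := 1 ≤ start ∨ stop ≤ start
instance (start : Int) (stop : Int) : Decidable (Pre_f start stop) := by unfold Pre_f; infer_instance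
def pvWitness_f : Int × Int := (1, 6)

def Spec_f (start : Int) (stop : Int) (out : Int) : Prop := out = f_alt start stop
instance (start : Int) (stop : Int) (out : Int) : Decidable (Spec_f start stop out) := by unfold Spec_f; infer_instance

-- ===== CLAIM (what is proved, stated in full; the proofs are below) =====
def Claim_equal_f : Prop := ∀ (start : Int) (stop : Int), Dom_f start stop → Pre_f start stop → Spec_f start stop (f start stop)

-- ===== LEMMAS AND PROOFS =====

-- canonical value of A's recursion at (s, stop) with exactly the fuel f itself uses
def Nf (stop s : Int) : Int := fAux ((stop - s).toNat + 1) s stop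

-- any sufficient fuel computes the canonical value (for 1 ≤ s)
theorem fAux_fuel (stop : Int) : ∀ (fuel : Nat) (s : Int), 1 ≤ s → (stop - s).toNat + 1 ≤ fuel →
    fAux fuel s stop = Nf stop s := by
  intro fuel
  induction fuel using Nat.strong_induction_on with
  | _ fuel ih =>
    intro s hs hfuel
    match fuel, hfuel with
    | fuel+1, hfuel =>
      unfold Nf
      rw [show (stop - s).toNat + 1 = (stop - s).toNat + 1 from rfl]
      show fAux (fuel+1) s stop = fAux ((stop - s).toNat + 1) s stop
      rw [fAux, fAux]
      by_cases h1 : s = stop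
      · simp [h1]
      · simp only [if_neg h1]
        by_cases h2 : s > stop ∨ s = 35
        · simp [h2]
        · simp only [if_neg h2]
          have hlt : s < stop := by omega
          have r1 : fAux fuel (s + 1) stop = Nf stop (s + 1) :=
            ih fuel (Nat.lt_succ_self _) _ (by omega) (by omega)
          have r2 : fAux fuel (s + 2) stop = Nf stop (s + 2) :=
            ih fuel (Nat.lt_succ_self _) _ (by omega) (by omega)
          have r3 : fAux fuel (s * 2) stop = Nf stop (s * 2) :=
            ih fuel (Nat.lt_succ_self _) _ (by omega) (by omega)
          have q1 : fAux (stop - s).toNat (s + 1) stop = Nf stop (s + 1) :=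
            ih (stop - s).toNat (by omega) _ (by omega) (by omega)
          have q2 : fAux (stop - s).toNat (s + 2) stop = Nf stop (s + 2) :=
            ih (stop - s).toNat (by omega) _ (by omega) (by omega)
          have q3 : fAux (stop - s).toNat (s * 2) stop = Nf stop (s * 2) :=
            ih (stop - s).toNat (by omega) _ (by omega) (by omega)
          simp [r1, r2, r3, q1, q2, q3]

theorem Nf_self (stop : Int) : Nf stop stop = 1 := by
  unfold Nf; rw [fAux]; simp

theorem Nf_gt {stop s : Int} (h : stop < s) : Nf stop s = 0 := by
  unfold Nf; rw [fAux]
  have : s ≠ stop := by omega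
  simp [this, h]

theorem Nf_rec {stop s : Int} (h1 : 1 ≤ s) (h2 : s < stop) (h3 : s ≠ 35) :
    Nf stop s = Nf stop (s + 1) + Nf stop (s + 2) + Nf stop (s * 2) := by
  conv_lhs => unfold Nf
  rw [fAux]
  have hne : s ≠ stop := by omega
  have hno : ¬ (s > stop ∨ s = 35) := by omega
  simp only [if_neg hne, if_neg hno]
  rw [fAux_fuel stop _ _ (by omega) (by omega),
      fAux_fuel stop _ _ (by omega) (by omega),
      fAux_fuel stop _ _ (by omega) (by omega)]
  simp [List.sum_cons]
  ring

theorem Nf_35 {stop : Int} (h : 35 < stop) : Nf stop 35 = 0 := by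
  unfold Nf; rw [fAux]
  have : (35 : Int) ≠ stop := by omega
  simp [this]

-- loop invariant: after processing s = a-1+n down to a, the dict maps exactly the keys
-- a..stop, each k to Nf stop k
theorem loop_inv (stop a : Int) (ha : 1 ≤ a) :
    ∀ (n : Nat) (d : PySem.Dict Int Int), (a - 1 + n) < stop →
    (∀ k, d.get? k = if (a - 1 + (n : Int)) < k ∧ k ≤ stop then some (Nf stop k) else none) →
    ∀ k, ((PySem.List.pyRange (a - 1 + n) (a - 1) (-1)).foldl fStep d).get? k
      = if a ≤ k ∧ k ≤ stop then some (Nf stop k) else none := by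
  intro n
  induction n with
  | zero =>
    intro d hlt hd k
    rw [PySem.List.pyRange_neg_one_eq_nil (by omega)]
    simp only [List.foldl_nil]
    rw [hd k]
    have h0 : (a - 1 + ((0:Nat):Int) < k ∧ k ≤ stop) ↔ (a ≤ k ∧ k ≤ stop) := by push_cast; omega
    rw [if_congr h0 rfl rfl]
  | succ n ih =>
    intro d hlt hd k
    set c : Int := a - 1 + (n + 1 : Nat) with hc
    have hca : a - 1 < c := by rw [hc]; omega
    rw [PySem.List.pyRange_neg_one_cons hca]
    simp only [List.foldl_cons]
    have hc1 : c - 1 = a - 1 + (n : Nat) := by rw [hc]; push_cast; ring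
    rw [hc1]
    apply ih
    · omega
    · -- the new dict after fStep d c satisfies the invariant one step lower
      intro j
      have hgetD : ∀ x, d.getD x 0 = if c < x ∧ x ≤ stop then Nf stop x else 0 := by
        intro x
        rw [PySem.Dict.getD_eq_get?_getD, hd x]
        by_cases h : c < x ∧ x ≤ stop
        · rw [if_pos h, if_pos h]; rfl
        · rw [if_neg h, if_neg h]; rfl
      have hcstop : c < stop := by omega
      have hc1pos : 1 ≤ c := by omega
      have hval : (if c = 35 then 0 else d.getD (c + 1) 0 + d.getD (c + 2) 0 + d.getD (c * 2) 0)
          = Nf stop c := by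
        by_cases h35 : c = 35
        · rw [if_pos h35, h35, Nf_35 (by omega)]
        · rw [if_neg h35, hgetD, hgetD, hgetD]
          rw [Nf_rec hc1pos hcstop h35]
          have e1 : (c < c + 1 ∧ c + 1 ≤ stop) := by omega
          rw [if_pos e1]
          congr 1
          · congr 1
            by_cases h2 : c + 2 ≤ stop
            · rw [if_pos ⟨by omega, h2⟩]
            · rw [if_neg (by omega), Nf_gt (by omega)]
          · by_cases h3 : c * 2 ≤ stop
            · rw [if_pos ⟨by nlinarith, h3⟩]
            · rw [if_neg (by omega), Nf_gt (by omega)]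
      unfold fStep
      rw [hval, PySem.Dict.get?_insert, hd j]
      by_cases hj : j = c
      · rw [if_pos hj, hj]
        rw [if_pos (by omega)]
      · rw [if_neg hj]
        have hiff : (c < j ∧ j ≤ stop) ↔ (a - 1 + (n:Int) < j ∧ j ≤ stop) := by
          push_cast at hc; omega
        rw [if_congr hiff rfl rfl]

-- ===== VERDICT (by name: the statement is the Claim_ definition above) =====
theorem f_spec : Claim_equal_f := by
  unfold Claim_equal_f
  intro start stop _ hpre
  unfold Spec_f f f_alt
  by_cases h1 : start = stop
  · subst h1
    rw [fAux]; simp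
  · rw [if_neg h1]
    by_cases h2 : start > stop ∨ start = 35
    · rw [if_pos h2]
      rw [fAux]
      simp only [if_neg h1, if_pos h2]
    · rw [if_neg h2]
      have hlt : start < stop := by omega
      have hs1 : 1 ≤ start := by
        rcases hpre with h | h
        · exact h
        · omega
      -- the loop fills keys start..stop with Nf
      have hinv := loop_inv stop start hs1 (stop - start).toNat
        ((PySem.Dict.empty).insert stop 1)
        (by omega)
        (by
          intro k
          rw [PySem.Dict.get?_insert]
          by_cases hk : k = stop
          · rw [if_pos hk, hk, if_pos (by omega)]
            rw [Nf_self]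
          · rw [if_neg hk, PySem.Dict.get?_empty]
            rw [if_neg (by omega)])
      have hrange : start - 1 + ((stop - start).toNat : Int) = stop - 1 := by omega
      rw [hrange] at hinv
      have hst := hinv start
      rw [if_pos ⟨le_refl start, by omega⟩] at hst
      rw [PySem.Dict.getD_eq_get?_getD, hst]
      rfl
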